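-- pv_equiv track=rewrite | github.com/forecastlab/forecast_dash | dash/pages/tools/moreseries.py | get_filtered_titles
-- ===== SOURCE A (Python) =====
-- def get_filtered_titles(tags_selected, unique_titles, tag_titles):
--     '''
--     Filtering available series titles with selected tags
--     '''
--     if tags_selected is None: return unique_titles
--     if len(tags_selected) == 0: return unique_titles
--
--     filtered_options = None
--     for tag in tags_selected:
--         if filtered_options is None: filtered_options = tag_titles[tag]
--         else: filtered_options = filtered_options & tag_titles[tag]
--     return sorted(list(filtered_options))
-- ===== SOURCE B (Python) =====
-- def get_filtered_titles(tags_selected, unique_titles, tag_titles):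
--     """Intersect the selected tags' title sets via one counting pass."""
--     if tags_selected is None:
--         return unique_titles
--     if len(tags_selected) == 0:
--         return unique_titles
--     counts = {}
--     for tag in tags_selected:
--         for title in tag_titles[tag]:
--             counts[title] = counts.get(title, 0) + 1
--     need = len(tags_selected)
--     return sorted([t for t, c in counts.items() if c == need])
-- ===== Notes on version B (the rewrite author's own statement) =====
-- stated objective: alternative
-- what changed: Replaces the fold of pairwise set intersections (&) with a single counting pass: a dict counts, per title, in how many selected tags' title lists it occurs, and the titles whose count equals len(tags_selected) are sorted and returned.
-- outside the precondition, e.g. on get_filtered_titles(['t'], ['u'], {'t': ['a', 'a']}): A returns ['a', 'a'], B returns []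
import Mathlib
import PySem

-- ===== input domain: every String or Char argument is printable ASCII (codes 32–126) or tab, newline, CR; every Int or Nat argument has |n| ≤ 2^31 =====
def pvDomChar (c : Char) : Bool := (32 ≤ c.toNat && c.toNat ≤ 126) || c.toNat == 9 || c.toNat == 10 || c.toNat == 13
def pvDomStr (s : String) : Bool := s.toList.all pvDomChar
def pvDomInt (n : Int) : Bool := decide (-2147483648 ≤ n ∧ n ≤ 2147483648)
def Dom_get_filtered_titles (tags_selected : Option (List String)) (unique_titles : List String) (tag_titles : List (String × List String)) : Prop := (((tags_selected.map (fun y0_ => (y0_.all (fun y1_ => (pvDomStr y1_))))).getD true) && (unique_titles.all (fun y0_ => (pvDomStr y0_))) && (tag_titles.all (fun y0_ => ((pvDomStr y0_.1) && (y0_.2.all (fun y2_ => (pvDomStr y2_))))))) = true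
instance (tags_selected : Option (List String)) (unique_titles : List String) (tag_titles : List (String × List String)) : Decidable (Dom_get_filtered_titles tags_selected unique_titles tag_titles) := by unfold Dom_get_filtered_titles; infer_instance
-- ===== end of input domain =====

-- B replaces A's fold of pairwise set intersections with one counting pass over the
-- selected tags' title sets (titles hitting every selected tag are kept), then sorts.


-- ===== PORT A =====
-- Loop body of A's for-loop: None → first tag's title set, else the '&' intersection.
-- The lookup tag_titles[tag] is ported with getD (Python raises KeyError on a missing
-- tag; such inputs are outside Pre_get_filtered_titles).
def stepA (tag_titles : List (String × List String)) (fo : Option (List String)) (tag : String) : Option (List String) :=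
  match fo with
  | none => some (PySem.Dict.getD (PySem.Dict.mk tag_titles) tag [])
  | some s => some (PySem.Set.inter s (PySem.Dict.getD (PySem.Dict.mk tag_titles) tag []))

def get_filtered_titles (tags_selected : Option (List String)) (unique_titles : List String) (tag_titles : List (String × List String)) : List String :=
  match tags_selected with
  | none => unique_titles
  | some tags =>
    if tags.length = 0 then unique_titles
    else
      let fo : Option (List String) := tags.foldl (stepA tag_titles) none
      PySem.List.sorted (fo.getD []) (fun x => x) false

-- ===== PORT B =====
def get_filtered_titles_alt (tags_selected : Option (List String)) (unique_titles : List String) (tag_titles : List (String × List String)) : List String :=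
  match tags_selected with
  | none => unique_titles
  | some tags =>
    if tags.length = 0 then unique_titles
    else
      let counts : PySem.Dict String Int := tags.foldl (fun d tag =>
        (PySem.Dict.getD (PySem.Dict.mk tag_titles) tag []).foldl
          (fun d title => PySem.Dict.insert d title (PySem.Dict.getD d title 0 + 1)) d)
        PySem.Dict.empty
      let need : Int := tags.length
      PySem.List.sorted ((counts.items.filter (fun p => p.2 == need)).map Prod.fst) (fun x => x) false

-- ===== PRECONDITION & SPEC =====
-- Pre_ excludes exactly the inputs where Python A raises: a selected tag missing from
-- tag_titles (KeyError). The Nodup clause is the encoding invariant of the argument, not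
-- an exclusion of Python inputs: tag_titles maps each tag to a Python SET of titles, and
-- a set arrives here as the list of its distinct elements.
def Pre_get_filtered_titles (tags_selected : Option (List String)) (unique_titles : List String) (tag_titles : List (String × List String)) : Prop :=
  ((tags_selected.all (fun tags => tags.all (fun t => (PySem.Dict.mk tag_titles).contains t)))
    && (tag_titles.all (fun p => decide p.2.Nodup))) = true
instance (tags_selected : Option (List String)) (unique_titles : List String) (tag_titles : List (String × List String)) : Decidable (Pre_get_filtered_titles tags_selected unique_titles tag_titles) := by unfold Pre_get_filtered_titles; infer_instance
def pvWitness_get_filtered_titles : Option (List String) × List String × (List (String × List String)) :=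
  (some ["t", "u"], ["x"], [("t", ["b", "a"]), ("u", ["b", "c"])])

def Spec_get_filtered_titles (tags_selected : Option (List String)) (unique_titles : List String) (tag_titles : List (String × List String)) (out : List String) : Prop := out = get_filtered_titles_alt tags_selected unique_titles tag_titles
instance (tags_selected : Option (List String)) (unique_titles : List String) (tag_titles : List (String × List String)) (out : List String) : Decidable (Spec_get_filtered_titles tags_selected unique_titles tag_titles out) := by unfold Spec_get_filtered_titles; infer_instance

-- ===== CLAIM (what is proved, stated in full; the proofs are below) =====
def Claim_equal_get_filtered_titles : Prop := ∀ (tags_selected : Option (List String)) (unique_titles : List String) (tag_titles : List (String × List String)), Dom_get_filtered_titles tags_selected unique_titles tag_titles → Pre_get_filtered_titles tags_selected unique_titles tag_titles → Spec_get_filtered_titles tags_selected unique_titles tag_titles (get_filtered_titles tags_selected unique_titles tag_titles)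

-- ===== LEMMAS AND PROOFS =====
-- A's loop, started on its first tag: the Option wrapper stays 'some' and the rest of
-- the loop is a plain fold of intersections.
theorem foldA_some (tag_titles : List (String × List String)) :
    ∀ (rest : List String) (s : List String),
      List.foldl (stepA tag_titles) (some s) rest
        = some (List.foldl (fun s tag => PySem.Set.inter s (PySem.Dict.getD (PySem.Dict.mk tag_titles) tag [])) s rest) := by
  intro rest
  induction rest with
  | nil => intro s; rfl
  | cons t r ih => intro s; simp [List.foldl, stepA, ih]

-- Membership in A's chain of intersections.
theorem mem_interFold (g : String → List String) :
    ∀ (rest : List String) (s : List String) (x : String),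
      x ∈ List.foldl (fun s tag => PySem.Set.inter s (g tag)) s rest
        ↔ (x ∈ s ∧ ∀ tag ∈ rest, x ∈ g tag) := by
  intro rest
  induction rest with
  | nil => simp
  | cons t r ih =>
    intro s x
    simp only [List.foldl, ih, PySem.Set.mem_inter, List.mem_cons]
    constructor
    · rintro ⟨⟨hs, ht⟩, hr⟩
      refine ⟨hs, ?_⟩
      rintro tag (rfl | htag)
      · exact ht
      · exact hr tag htag
    · rintro ⟨hs, hall⟩
      exact ⟨⟨hs, hall t (Or.inl rfl)⟩, fun tag htag => hall tag (Or.inr htag)⟩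

theorem nodup_interFold (g : String → List String) :
    ∀ (rest : List String) (s : List String), s.Nodup →
      (List.foldl (fun s tag => PySem.Set.inter s (g tag)) s rest).Nodup := by
  intro rest
  induction rest with
  | nil => intro s h; exact h
  | cons t r ih => intro s h; exact ih _ (PySem.Set.nodup_inter s (g t) h)

-- B's counter after the whole double loop: each title's count is the sum, over the
-- selected tags, of its count in that tag's title set.
theorem cnt_fold (g : String → List String) :
    ∀ (tags : List String) (d : PySem.Dict String Int) (v : String),
      (List.foldl (fun d tag =>
          List.foldl (fun d title => PySem.Dict.insert d title (PySem.Dict.getD d title 0 + 1)) d (g tag)) d tags).getD v 0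
        = d.getD v 0 + ((tags.map (fun tag => ((g tag).count v : Int))).sum) := by
  intro tags
  induction tags with
  | nil => simp
  | cons t r ih =>
    intro d v
    simp only [List.foldl, List.map, List.sum_cons, ih, PySem.Dict.getD_foldl_insert_add_one]
    ring

theorem nodup_keys_fold (g : String → List String) :
    ∀ (tags : List String) (d : PySem.Dict String Int), d.keys.Nodup →
      (List.foldl (fun d tag =>
          List.foldl (fun d title => PySem.Dict.insert d title (PySem.Dict.getD d title 0 + 1)) d (g tag)) d tags).keys.Nodup := by
  intro tags
  induction tags with
  | nil => intro d h; exact h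
  | cons t r ih =>
    intro d h
    exact ih _ (PySem.Dict.nodup_keys_foldl_insert (g t) (fun d x => PySem.Dict.getD d x 0 + 1) d h)

theorem mem_keys_fold (g : String → List String) :
    ∀ (tags : List String) (d : PySem.Dict String Int) (v : String),
      v ∈ (List.foldl (fun d tag =>
          List.foldl (fun d title => PySem.Dict.insert d title (PySem.Dict.getD d title 0 + 1)) d (g tag)) d tags).keys
        ↔ v ∈ d.keys ∨ ∃ tag ∈ tags, v ∈ g tag := by
  intro tags
  induction tags with
  | nil => simp
  | cons t r ih =>
    intro d v
    simp only [List.foldl, ih, PySem.Dict.keys_foldl_insert]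
    have hupd : v ∈ PySem.Set.update d.keys (g t) ↔ v ∈ d.keys ∨ v ∈ g t := by
      simp [pysem]
    rw [hupd]
    constructor
    · rintro ((h | h) | ⟨tag, htag, hm⟩)
      · exact Or.inl h
      · exact Or.inr ⟨t, List.mem_cons_self .., h⟩
      · exact Or.inr ⟨tag, List.mem_cons_of_mem _ htag, hm⟩
    · rintro (h | ⟨tag, htag, hm⟩)
      · exact Or.inl (Or.inl h)
      · rcases List.mem_cons.mp htag with rfl | htag
        · exact Or.inl (Or.inr hm)
        · exact Or.inr ⟨tag, htag, hm⟩

theorem sum_nonneg_counts (g : String → List String) (tags : List String) (v : String) :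
    0 ≤ ((tags.map (fun tag => ((g tag).count v : Int))).sum) := by
  apply List.sum_nonneg
  intro y hy
  obtain ⟨tag, _, rfl⟩ := List.mem_map.mp hy
  exact Int.natCast_nonneg _

theorem sum_bounds (g : String → List String) :
    ∀ (tags : List String) (v : String), (∀ tag ∈ tags, (g tag).Nodup) →
      ((tags.map (fun tag => ((g tag).count v : Int))).sum) ≤ tags.length := by
  intro tags v
  induction tags with
  | nil => simp
  | cons t r ih =>
    intro hnd
    simp only [List.map, List.sum_cons, List.length_cons]
    have h1 : (g t).count v ≤ 1 := List.nodup_iff_count_le_one.mp (hnd t (List.mem_cons_self ..)) v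
    have hr := ih (fun tag htag => hnd tag (List.mem_cons_of_mem _ htag))
    push_cast
    push_cast at hr
    omega

-- Each per-tag count is 0 or 1 (the tag's titles form a set), so the total hits
-- len(tags) exactly on the titles present in EVERY selected tag's set.
theorem sum_eq_iff (g : String → List String) :
    ∀ (tags : List String) (v : String), (∀ tag ∈ tags, (g tag).Nodup) →
      (((tags.map (fun tag => ((g tag).count v : Int))).sum) = tags.length
        ↔ ∀ tag ∈ tags, v ∈ g tag) := by
  intro tags v
  induction tags with
  | nil => simp
  | cons t r ih =>
    intro hnd
    have hndr : ∀ tag ∈ r, (g tag).Nodup := fun tag htag => hnd tag (List.mem_cons_of_mem _ htag)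
    have hndt : (g t).Nodup := hnd t (List.mem_cons_self ..)
    have h1 : (g t).count v ≤ 1 := List.nodup_iff_count_le_one.mp hndt v
    have hle := sum_bounds g r v hndr
    have hS0 := sum_nonneg_counts g r v
    have hpos : 0 < (g t).count v ↔ v ∈ g t := List.count_pos_iff
    have ihr := ih hndr
    simp only [List.map, List.sum_cons, List.length_cons, List.forall_mem_cons]
    constructor
    · intro he
      have hc : (g t).count v = 1 ∧ (r.map (fun tag => ((g tag).count v : Int))).sum = r.length := by
        push_cast at he hle hS0 ⊢
        omega
      exact ⟨hpos.mp (by omega), ihr.mp hc.2⟩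
    · rintro ⟨hm, hall⟩
      have hc1 : (g t).count v = 1 := by
        have := hpos.mpr hm
        omega
      rw [hc1, ihr.mpr hall]
      push_cast
      ring

-- The looked-up value of any tag is duplicate-free when every stored title set is.
theorem nodup_getD (tag_titles : List (String × List String))
    (hset : ∀ p ∈ tag_titles, p.2.Nodup) (tag : String) :
    (PySem.Dict.getD (PySem.Dict.mk tag_titles) tag []).Nodup := by
  rw [PySem.Dict.getD_eq_get?_getD]
  cases hg : (PySem.Dict.mk tag_titles).get? tag with
  | none => simp
  | some v =>
    have hmem : (tag, v) ∈ tag_titles :=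
      PySem.Dict.mem_items_of_get?_eq_some (d := PySem.Dict.mk tag_titles) hg
    exact hset _ hmem

-- Proof-side names for B's counter (value type pinned to Int, as in the port).
def b0 (g : String → List String) (t : String) : PySem.Dict String Int :=
  List.foldl (fun d title => PySem.Dict.insert d title (PySem.Dict.getD d title 0 + 1)) PySem.Dict.empty (g t)

def bcounts (g : String → List String) (t : String) (rest : List String) : PySem.Dict String Int :=
  List.foldl (fun d tag =>
    List.foldl (fun d title => PySem.Dict.insert d title (PySem.Dict.getD d title 0 + 1)) d (g tag)) (b0 g t) rest

theorem bcounts_keys_nodup (g : String → List String) (t : String) (rest : List String) :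
    (bcounts g t rest).keys.Nodup := by
  have hd0kn : (b0 g t).keys.Nodup := by
    unfold b0
    exact PySem.Dict.nodup_keys_foldl_insert (g t) (fun d x => PySem.Dict.getD d x 0 + 1)
      (PySem.Dict.empty : PySem.Dict String Int) (by simp [PySem.Dict.keys_empty])
  unfold bcounts
  exact nodup_keys_fold g rest (b0 g t) hd0kn

theorem bcounts_getD (g : String → List String) (t : String) (rest : List String) (x : String) :
    (bcounts g t rest).getD x 0 = (((t :: rest).map (fun tag => ((g tag).count x : Int))).sum) := by
  unfold bcounts b0
  rw [cnt_fold, PySem.Dict.getD_foldl_insert_add_one, PySem.Dict.getD_empty]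
  simp

theorem bcounts_mem_keys (g : String → List String) (t : String) (rest : List String) (x : String) :
    x ∈ (bcounts g t rest).keys ↔ ∃ tag ∈ t :: rest, x ∈ g tag := by
  unfold bcounts b0
  rw [mem_keys_fold, PySem.Dict.keys_foldl_insert]
  have hupd : x ∈ PySem.Set.update (PySem.Dict.empty : PySem.Dict String Int).keys (g t) ↔ x ∈ g t := by
    simp [pysem, PySem.Dict.keys_empty]
  rw [hupd]
  constructor
  · rintro (h | ⟨tag, htag, hm⟩)
    · exact ⟨t, List.mem_cons_self .., h⟩
    · exact ⟨tag, List.mem_cons_of_mem _ htag, hm⟩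
  · rintro ⟨tag, htag, hm⟩
    rcases List.mem_cons.mp htag with rfl | htag
    · exact Or.inl hm
    · exact Or.inr ⟨tag, htag, hm⟩

-- B's result list before sorting: exactly the titles lying in every selected tag's set.
theorem B_mem (g : String → List String) (t : String) (rest : List String)
    (hgnd : ∀ tag, (g tag).Nodup) (x : String) :
    (x ∈ ((bcounts g t rest).items.filter (fun p => p.2 == (((t :: rest).length : Nat) : Int))).map Prod.fst)
      ↔ ∀ tag ∈ t :: rest, x ∈ g tag := by
  have hkn := bcounts_keys_nodup g t rest
  have hiff := sum_eq_iff g (t :: rest) x (fun tag _ => hgnd tag)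
  rw [List.mem_map]
  constructor
  · rintro ⟨p, hp, hps⟩
    rw [List.mem_filter] at hp
    obtain ⟨hpm, hpv⟩ := hp
    rw [beq_iff_eq] at hpv
    have hq : (bcounts g t rest).get? p.1 = some p.2 :=
      (PySem.Dict.get?_eq_some_iff_mem_items _ _ _ hkn).mpr hpm
    rw [hps] at hq
    have hval : (bcounts g t rest).getD x 0 = p.2 := by
      rw [PySem.Dict.getD_eq_get?_getD, hq]
      rfl
    apply hiff.mp
    rw [← bcounts_getD g t rest x, hval, hpv]
  · intro hall
    have hx := (bcounts_mem_keys g t rest x).mpr ⟨t, List.mem_cons_self .., hall t (List.mem_cons_self ..)⟩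
    have hsum := hiff.mpr hall
    cases hq : (bcounts g t rest).get? x with
    | none =>
      exact absurd ((PySem.Dict.get?_eq_none_iff_not_mem_keys _ _).mp hq) (by simpa using hx)
    | some w =>
      have hv : (bcounts g t rest).getD x 0 = w := by
        rw [PySem.Dict.getD_eq_get?_getD, hq]
        rfl
      have hw : w = (((t :: rest).length : Nat) : Int) := by
        rw [← hv, bcounts_getD g t rest x]
        exact hsum
      refine ⟨(x, w), ?_, rfl⟩
      rw [List.mem_filter]
      refine ⟨(PySem.Dict.get?_eq_some_iff_mem_items _ _ _ hkn).mp hq, ?_⟩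
      rw [beq_iff_eq]
      exact hw

-- ===== VERDICT (by name: the statement is the Claim_ definition above) =====
theorem get_filtered_titles_spec : Claim_equal_get_filtered_titles := by
  intro ts ut tt _ hpre
  unfold Spec_get_filtered_titles
  cases ts with
  | none => rfl
  | some tags =>
    simp only [Pre_get_filtered_titles, Option.all_some, Bool.and_eq_true, List.all_eq_true,
      decide_eq_true_eq] at hpre
    obtain ⟨_, hset⟩ := hpre
    have hgnd : ∀ tag, (PySem.Dict.getD (PySem.Dict.mk tt) tag []).Nodup :=
      fun tag => nodup_getD tt hset tag
    cases tags with
    | nil => rfl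
    | cons t rest =>
      have hne : ¬((t :: rest).length = 0) := by simp
      unfold get_filtered_titles get_filtered_titles_alt
      simp only [List.foldl_cons, if_neg hne]
      rw [show stepA tt none t = some (PySem.Dict.getD (PySem.Dict.mk tt) t []) from rfl,
          foldA_some, Option.getD_some]
      apply (PySem.List.sorted_id_eq_sorted_id_iff_perm _ _).mpr
      apply (List.perm_ext_iff_of_nodup ?nA ?nB).mpr
      case nA =>
        exact nodup_interFold (fun tag => PySem.Dict.getD (PySem.Dict.mk tt) tag []) rest _ (hgnd t)
      case nB =>
        apply List.Nodup.sublist (List.Sublist.map Prod.fst (List.filter_sublist))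
        have hkn := bcounts_keys_nodup (fun tag => PySem.Dict.getD (PySem.Dict.mk tt) tag []) t rest
        simp only [bcounts, b0] at hkn
        exact hkn
      intro x
      have hB := B_mem (fun tag => PySem.Dict.getD (PySem.Dict.mk tt) tag []) t rest hgnd x
      simp only [bcounts, b0] at hB
      rw [mem_interFold (fun tag => PySem.Dict.getD (PySem.Dict.mk tt) tag []) rest _ x, hB]
      simp
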